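-- pv_equiv track=rewrite | github.com/rafael-503/gerenciador_banco | queries.py | juntaComCondicao
-- ===== SOURCE A (Python) =====
-- def juntaComCondicao(tabela1, tabela2, colunaComum, coluna, operador, valor):
--     # Cria um índice para a tabela2 usando a colunaComum
--     index_tabela2 = {str(linha[colunaComum]): linha for linha in tabela2}
--
--     resultado = []
--
--     for linha1 in tabela1:
--         # Verifica se a colunaComum está presente na linha1
--         if colunaComum in linha1:
--             chave = str(linha1[colunaComum])
--
--             # Verifica se a chave está presente no índice
--             if chave in index_tabela2:
--                 linha2 = index_tabela2[chave]
--
--                 # Avalia a condição com base no operador, tratando strings como strings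
--                 valor_coluna = linha2[coluna]
--                 try:
--                     valor_coluna = int(valor_coluna)
--                     valor = int(valor)
--                 except ValueError:
--                     pass  # Se não for possível converter para int, mantém como string
--
--                 if operador == '=' and valor_coluna == valor:
--                     linha_resultado = {**linha1, **linha2}
--                     resultado.append(linha_resultado)
--                 elif operador == '<' and valor_coluna < valor:
--                     linha_resultado = {**linha1, **linha2}
--                     resultado.append(linha_resultado)
--                 elif operador == '>' and valor_coluna > valor:
--                     linha_resultado = {**linha1, **linha2}
--                     resultado.append(linha_resultado)
--                 elif operador == '<=' and valor_coluna <= valor: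
--                     linha_resultado = {**linha1, **linha2}
--                     resultado.append(linha_resultado)
--                 elif operador == '>=' and valor_coluna >= valor:
--                     linha_resultado = {**linha1, **linha2}
--                     resultado.append(linha_resultado)
--
--     # Retorna os dados no formato esperado por onde
--     campos = resultado[0].keys() if resultado else []
--     return {campo: [linha[campo] for linha in resultado] for campo in campos}
-- ===== SOURCE B (Python) =====
-- def juntaComCondicao(tabela1, tabela2, colunaComum, coluna, operador, valor):
--     ALLOWED = {'=': (0,), '<': (-1,), '>': (1,), '<=': (-1, 0), '>=': (0, 1)}
--     resultado = []
--     for linha1 in tabela1: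
--         if colunaComum not in linha1:
--             continue
--         chave = str(linha1[colunaComum])
--         linha2 = None
--         for cand in reversed(tabela2):
--             if str(cand[colunaComum]) == chave:
--                 linha2 = cand
--                 break
--         if linha2 is None:
--             continue
--         valor_coluna = linha2[coluna]
--         try:
--             valor_coluna = int(valor_coluna)
--             valor = int(valor)
--         except ValueError:
--             pass
--         if type(valor_coluna) is type(valor):
--             sinal = (valor_coluna > valor) - (valor_coluna < valor)
--             if sinal in ALLOWED.get(operador, ()):
--                 resultado.append({**linha1, **linha2})
--     if not resultado:
--         return {}
--     campos = resultado[0].keys()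
--     return {campo: [linha[campo] for linha in resultado] for campo in campos}
-- ===== Notes on version B (the rewrite author's own statement) =====
-- stated objective: alternative
-- what changed: Replaces the precomputed last-wins dict index over tabela2 with a reversed nested-loop scan stopping at the first (i.e. last) matching row, and replaces the =/</>/<=/>= if-elif comparison chain with a three-way comparison sign checked against a per-operator table of allowed signs.
import Mathlib
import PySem

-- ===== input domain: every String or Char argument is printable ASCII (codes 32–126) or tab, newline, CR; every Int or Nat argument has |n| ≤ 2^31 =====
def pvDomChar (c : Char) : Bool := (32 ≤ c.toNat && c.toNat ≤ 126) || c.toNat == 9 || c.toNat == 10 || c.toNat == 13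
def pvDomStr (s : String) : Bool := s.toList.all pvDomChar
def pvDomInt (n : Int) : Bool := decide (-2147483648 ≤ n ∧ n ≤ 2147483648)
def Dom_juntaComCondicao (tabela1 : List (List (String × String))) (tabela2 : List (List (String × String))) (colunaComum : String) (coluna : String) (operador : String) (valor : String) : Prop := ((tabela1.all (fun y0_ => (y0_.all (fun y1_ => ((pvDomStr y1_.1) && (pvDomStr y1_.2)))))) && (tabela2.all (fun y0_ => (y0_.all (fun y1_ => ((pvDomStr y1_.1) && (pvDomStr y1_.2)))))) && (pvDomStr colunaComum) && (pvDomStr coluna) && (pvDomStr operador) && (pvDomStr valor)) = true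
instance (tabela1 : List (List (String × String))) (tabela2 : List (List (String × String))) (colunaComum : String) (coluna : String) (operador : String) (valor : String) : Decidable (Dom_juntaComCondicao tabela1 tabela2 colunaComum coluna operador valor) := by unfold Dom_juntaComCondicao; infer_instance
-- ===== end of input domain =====

-- B replaces A's last-wins dict index over tabela2 by a reversed nested-loop scan and the if-elif
-- operator chain by a comparison-sign table (objective: alternative decomposition, not speed).

-- shared helpers: these Python lines are textually identical in Source A and Source B
-- (rows arrive as association lists for Python dicts; PySem.Dict.ofList rebuilds the dict)
def pvRow (r : List (String × String)) : PySem.Dict String String := PySem.Dict.ofList r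

-- the try: valor_coluna = int(valor_coluna); valor = int(valor); except ValueError: pass block,
-- acting on (valor_coluna, current valor); int ⊕ str values model Python's int-or-str state
def pvConv (vc0 : String) (v : Int ⊕ String) : (Int ⊕ String) × (Int ⊕ String) :=
  match PySem.Int.ofStr? vc0 with
  | none => (Sum.inr vc0, v)
  | some n =>
    match v with
    | Sum.inl m => (Sum.inl n, Sum.inl m)
    | Sum.inr s =>
      match PySem.Int.ofStr? s with
      | some m => (Sum.inl n, Sum.inl m)
      | none => (Sum.inl n, Sum.inr s)

-- {**linha1, **linha2}
def pvMerge (linha1 linha2 : List (String × String)) : PySem.Dict String String :=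
  linha2.foldl (fun d p => d.insert p.1 p.2) (pvRow linha1)

-- campos = resultado[0].keys() if resultado else []; {campo: [linha[campo] for linha in resultado] for campo in campos}
def pvTranspose (res : List (PySem.Dict String String)) : List (String × List String) :=
  match res with
  | [] => []
  | r :: _ => r.keys.map (fun c => (c, res.map (fun q => q.getD c "")))

-- ===== PORT A =====
-- A-side comparisons: mixed int/str '==' is False in Python; mixed ordered comparisons raise
-- TypeError (excluded by Pre_), the port returns false there
def pvEqA : Int ⊕ String → Int ⊕ String → Bool
  | Sum.inl a, Sum.inl b => a == b
  | Sum.inr a, Sum.inr b => a == b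
  | _, _ => false
def pvLtA : Int ⊕ String → Int ⊕ String → Bool
  | Sum.inl a, Sum.inl b => decide (a < b)
  | Sum.inr a, Sum.inr b => decide (a < b)
  | _, _ => false
def pvGtA : Int ⊕ String → Int ⊕ String → Bool
  | Sum.inl a, Sum.inl b => decide (b < a)
  | Sum.inr a, Sum.inr b => decide (b < a)
  | _, _ => false
def pvLeA : Int ⊕ String → Int ⊕ String → Bool
  | Sum.inl a, Sum.inl b => decide (a ≤ b)
  | Sum.inr a, Sum.inr b => decide (a ≤ b)
  | _, _ => false
def pvGeA : Int ⊕ String → Int ⊕ String → Bool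
  | Sum.inl a, Sum.inl b => decide (b ≤ a)
  | Sum.inr a, Sum.inr b => decide (b ≤ a)
  | _, _ => false

def juntaComCondicao (tabela1 : List (List (String × String))) (tabela2 : List (List (String × String))) (colunaComum : String) (coluna : String) (operador : String) (valor : String) : List (String × List String) :=
  let index := tabela2.foldl (fun d l2 => d.insert ((pvRow l2).getD colunaComum "") l2) PySem.Dict.empty
  let st := tabela1.foldl (fun (acc : List (PySem.Dict String String) × (Int ⊕ String)) linha1 =>
    if (pvRow linha1).contains colunaComum then
      let chave := (pvRow linha1).getD colunaComum ""
      match index.get? chave with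
      | some linha2 =>
        let cv := pvConv ((pvRow linha2).getD coluna "") acc.2
        if operador == "=" && pvEqA cv.1 cv.2 then (acc.1 ++ [pvMerge linha1 linha2], cv.2)
        else if operador == "<" && pvLtA cv.1 cv.2 then (acc.1 ++ [pvMerge linha1 linha2], cv.2)
        else if operador == ">" && pvGtA cv.1 cv.2 then (acc.1 ++ [pvMerge linha1 linha2], cv.2)
        else if operador == "<=" && pvLeA cv.1 cv.2 then (acc.1 ++ [pvMerge linha1 linha2], cv.2)
        else if operador == ">=" && pvGeA cv.1 cv.2 then (acc.1 ++ [pvMerge linha1 linha2], cv.2)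
        else (acc.1, cv.2)
      | none => acc
    else acc) ([], Sum.inr valor)
  pvTranspose st.1

-- ===== PORT B =====
-- sinal = (x > y) - (x < y) when both sides have the same type, None on a type mismatch
def pvSign : Int ⊕ String → Int ⊕ String → Option Int
  | Sum.inl a, Sum.inl b => some ((if b < a then 1 else 0) - (if a < b then 1 else 0))
  | Sum.inr a, Sum.inr b => some ((if b < a then 1 else 0) - (if a < b then 1 else 0))
  | _, _ => none
-- ALLOWED.get(operador, ())
def pvAllowed (op : String) : List Int :=
  if op == "=" then [0] else if op == "<" then [-1] else if op == ">" then [1]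
  else if op == "<=" then [-1, 0] else if op == ">=" then [0, 1] else []

def juntaComCondicao_alt (tabela1 : List (List (String × String))) (tabela2 : List (List (String × String))) (colunaComum : String) (coluna : String) (operador : String) (valor : String) : List (String × List String) :=
  let st := tabela1.foldl (fun (acc : List (PySem.Dict String String) × (Int ⊕ String)) linha1 =>
    if (pvRow linha1).contains colunaComum then
      let chave := (pvRow linha1).getD colunaComum ""
      match tabela2.reverse.find? (fun cand => (pvRow cand).getD colunaComum "" == chave) with
      | none => acc
      | some linha2 =>
        let cv := pvConv ((pvRow linha2).getD coluna "") acc.2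
        match pvSign cv.1 cv.2 with
        | some s => (if s ∈ pvAllowed operador then acc.1 ++ [pvMerge linha1 linha2] else acc.1, cv.2)
        | none => (acc.1, cv.2)
    else acc) ([], Sum.inr valor)
  pvTranspose st.1

-- ===== PRECONDITION & SPEC =====
-- the joined tabela2 row A touches for a given tabela1 row: the LAST tabela2 row whose
-- colunaComum value equals it (None when linha1 lacks colunaComum or nothing matches)
def pvCand (tabela2 : List (List (String × String))) (colunaComum : String) (l1 : List (String × String)) : Option (List (String × String)) :=
  if (PySem.Dict.ofList l1).contains colunaComum then
    tabela2.reverse.find? (fun c => (PySem.Dict.ofList c).getD colunaComum "" == (PySem.Dict.ofList l1).getD colunaComum "")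
  else none

-- the (linha1, joined linha2) pairs A can reach
def pvJoined (tabela1 tabela2 : List (List (String × String))) (colunaComum : String) : List ((List (String × String)) × (List (String × String))) :=
  tabela1.filterMap (fun l1 => (pvCand tabela2 colunaComum l1).map (fun l2 => (l1, l2)))

-- the keys of {**linha1, **linha2}
def pvMergedKeys (l1 l2 : List (String × String)) : List String :=
  (l2.foldl (fun d p => d.insert p.1 p.2) (PySem.Dict.ofList l1)).keys

-- Pre_ excludes (approximating slightly from above) the inputs where the Python A raises:
-- KeyError from a tabela2 row missing colunaComum or a joined row missing coluna, KeyError in the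
-- final transposition when joined rows do not share one merged key set, and TypeError from an
-- ordered comparison of int with str, approximated by requiring the compared column of the joined
-- rows to be uniformly int-convertible (together with valor) or uniformly not.
def Pre_juntaComCondicao (tabela1 : List (List (String × String))) (tabela2 : List (List (String × String))) (colunaComum : String) (coluna : String) (operador : String) (valor : String) : Prop :=
  (∀ r ∈ tabela2, colunaComum ∈ r.map Prod.fst) ∧
  (∀ p ∈ pvJoined tabela1 tabela2 colunaComum, coluna ∈ p.2.map Prod.fst) ∧
  (∀ p ∈ pvJoined tabela1 tabela2 colunaComum, ∀ q ∈ pvJoined tabela1 tabela2 colunaComum,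
     ∀ k ∈ pvMergedKeys p.1 p.2, k ∈ pvMergedKeys q.1 q.2) ∧
  (operador ∈ ["<", ">", "<=", ">="] →
    ((PySem.Int.ofStr? valor ≠ none ∧
      ∀ p ∈ pvJoined tabela1 tabela2 colunaComum, PySem.Int.ofStr? ((PySem.Dict.ofList p.2).getD coluna "") ≠ none) ∨
     (∀ p ∈ pvJoined tabela1 tabela2 colunaComum, PySem.Int.ofStr? ((PySem.Dict.ofList p.2).getD coluna "") = none)))
instance (tabela1 : List (List (String × String))) (tabela2 : List (List (String × String))) (colunaComum : String) (coluna : String) (operador : String) (valor : String) : Decidable (Pre_juntaComCondicao tabela1 tabela2 colunaComum coluna operador valor) := by unfold Pre_juntaComCondicao; infer_instance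

def pvWitness_juntaComCondicao : (List (List (String × String))) × (List (List (String × String))) × String × String × String × String :=
  ([[("id", "1")]], [[("id", "1"), ("v", "2")]], "id", "v", "=", "2")

def Spec_juntaComCondicao (tabela1 : List (List (String × String))) (tabela2 : List (List (String × String))) (colunaComum : String) (coluna : String) (operador : String) (valor : String) (out : List (String × List String)) : Prop := out = juntaComCondicao_alt tabela1 tabela2 colunaComum coluna operador valor
instance (tabela1 : List (List (String × String))) (tabela2 : List (List (String × String))) (colunaComum : String) (coluna : String) (operador : String) (valor : String) (out : List (String × List String)) : Decidable (Spec_juntaComCondicao tabela1 tabela2 colunaComum coluna operador valor out) := by unfold Spec_juntaComCondicao; infer_instance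

-- ===== CLAIM (what is proved, stated in full; the proofs are below) =====
def Claim_equal_juntaComCondicao : Prop := ∀ (tabela1 : List (List (String × String))) (tabela2 : List (List (String × String))) (colunaComum : String) (coluna : String) (operador : String) (valor : String), Dom_juntaComCondicao tabela1 tabela2 colunaComum coluna operador valor → Pre_juntaComCondicao tabela1 tabela2 colunaComum coluna operador valor → Spec_juntaComCondicao tabela1 tabela2 colunaComum coluna operador valor (juntaComCondicao tabela1 tabela2 colunaComum coluna operador valor)

-- ===== LEMMAS AND PROOFS =====

-- the last-wins dict index looked up at k is the first match of the reversed scan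
theorem index_get_fold (l : List (List (String × String))) (colunaComum k : String) (d : PySem.Dict String (List (String × String))) :
    (l.foldl (fun d l2 => d.insert ((pvRow l2).getD colunaComum "") l2) d).get? k
      = ((l.reverse.find? (fun cand => (pvRow cand).getD colunaComum "" == k)).or (d.get? k)) := by
  induction l generalizing d with
  | nil => simp
  | cons x t ih =>
    simp only [List.foldl_cons, List.reverse_cons, List.find?_append, ih]
    cases h : t.reverse.find? (fun cand => (pvRow cand).getD colunaComum "" == k) with
    | some c => simp [Option.or]
    | none =>
      simp only [Option.or, List.find?_cons, List.find?_nil]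
      by_cases he : (pvRow x).getD colunaComum "" = k
      · simp [he]
      · have hb : ((pvRow x).getD colunaComum "" == k) = false := beq_eq_false_iff_ne.mpr he
        simp [PySem.Dict.get?_insert, hb]
        exact fun h' => absurd h'.symm he

theorem index_get_eq_rev_find (l : List (List (String × String))) (colunaComum k : String) :
    (l.foldl (fun d l2 => d.insert ((pvRow l2).getD colunaComum "") l2) PySem.Dict.empty).get? k
      = l.reverse.find? (fun cand => (pvRow cand).getD colunaComum "" == k) := by
  rw [index_get_fold]
  cases l.reverse.find? (fun cand => (pvRow cand).getD colunaComum "" == k) <;> rfl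

-- A's if-elif chain equals B's sign-table dispatch, abstracted over the five comparison booleans
theorem chain_boole {b_ : Type} (op : String) (sign : Int) (beq blt bgt ble bge : Bool) (r1 r0 : b_)
    (h1 : beq = (sign == 0)) (h2 : blt = (sign == -1)) (h3 : bgt = (sign == 1))
    (h4 : ble = (sign == -1 || sign == 0)) (h5 : bge = (sign == 0 || sign == 1))
    (hs : sign = -1 ∨ sign = 0 ∨ sign = 1) :
    (if op == "=" && beq then r1
     else if op == "<" && blt then r1
     else if op == ">" && bgt then r1
     else if op == "<=" && ble then r1
     else if op == ">=" && bge then r1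
     else r0)
      = (if sign ∈ pvAllowed op then r1 else r0) := by
  subst h1 h2 h3 h4 h5
  by_cases e1 : op = "=" <;> by_cases e2 : op = "<" <;> by_cases e3 : op = ">" <;>
    by_cases e4 : op = "<=" <;> by_cases e5 : op = ">=" <;>
      rcases hs with h | h | h <;> subst h <;> simp_all [pvAllowed]

-- A's if-elif chain on (result, valor) pairs equals B's sign-table dispatch
theorem chain_eq_sign (op : String) (vc v : Int ⊕ String) (res : List (PySem.Dict String String))
    (m : PySem.Dict String String) (w : Int ⊕ String) :
    (if op == "=" && pvEqA vc v then (res ++ [m], w)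
     else if op == "<" && pvLtA vc v then (res ++ [m], w)
     else if op == ">" && pvGtA vc v then (res ++ [m], w)
     else if op == "<=" && pvLeA vc v then (res ++ [m], w)
     else if op == ">=" && pvGeA vc v then (res ++ [m], w)
     else (res, w))
      = (match pvSign vc v with
         | some s => (if s ∈ pvAllowed op then res ++ [m] else res, w)
         | none => (res, w)) := by
  have key : ∀ {a_ : Type} [inst : LinearOrder a_] (a b : a_),
      ((if a = b then true else false) = (((if b < a then (1 : Int) else 0) - (if a < b then 1 else 0)) == 0)) ∧
      ((if a < b then true else false) = (((if b < a then (1 : Int) else 0) - (if a < b then 1 else 0)) == -1)) ∧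
      ((if b < a then true else false) = (((if b < a then (1 : Int) else 0) - (if a < b then 1 else 0)) == 1)) ∧
      ((if a ≤ b then true else false) = ((((if b < a then (1 : Int) else 0) - (if a < b then 1 else 0)) == -1) || (((if b < a then (1 : Int) else 0) - (if a < b then 1 else 0)) == 0))) ∧
      ((if b ≤ a then true else false) = ((((if b < a then (1 : Int) else 0) - (if a < b then 1 else 0)) == 0) || (((if b < a then (1 : Int) else 0) - (if a < b then 1 else 0)) == 1))) ∧
      (((if b < a then (1 : Int) else 0) - (if a < b then 1 else 0)) = -1 ∨
       ((if b < a then (1 : Int) else 0) - (if a < b then 1 else 0)) = 0 ∨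
       ((if b < a then (1 : Int) else 0) - (if a < b then 1 else 0)) = 1) := by
    intro a_ inst a b
    rcases lt_trichotomy a b with h | h | h
    · have hba : ¬ b < a := lt_asymm h
      have hne : a ≠ b := ne_of_lt h
      have hle : a ≤ b := le_of_lt h
      have hnle : ¬ b ≤ a := not_le.mpr h
      simp [h, hba, hne, hle, hnle]
    · subst h
      simp
    · have hab : ¬ a < b := lt_asymm h
      have hne : a ≠ b := (ne_of_gt h)
      have hle : b ≤ a := le_of_lt h
      have hnle : ¬ a ≤ b := not_le.mpr h
      simp [h, hab, hne, hle, hnle]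
  cases vc with
  | inl a =>
    cases v with
    | inl b =>
      simp only [pvEqA, pvLtA, pvGtA, pvLeA, pvGeA, pvSign]
      obtain ⟨k1, k2, k3, k4, k5, k6⟩ := key a b
      simp only [show (a == b) = (if a = b then true else false) from by by_cases h : a = b <;> simp [h],
          show (decide (a < b)) = (if a < b then true else false) from by by_cases h : a < b <;> simp [h],
          show (decide (b < a)) = (if b < a then true else false) from by by_cases h : b < a <;> simp [h],
          show (decide (a ≤ b)) = (if a ≤ b then true else false) from by by_cases h : a ≤ b <;> simp [h],
          show (decide (b ≤ a)) = (if b ≤ a then true else false) from by by_cases h : b ≤ a <;> simp [h]]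
      rw [chain_boole op _ _ _ _ _ _ _ _ k1 k2 k3 k4 k5 k6]
      split_ifs <;> rfl
    | inr b => simp [pvEqA, pvLtA, pvGtA, pvLeA, pvGeA, pvSign]
  | inr a =>
    cases v with
    | inl b => simp [pvEqA, pvLtA, pvGtA, pvLeA, pvGeA, pvSign]
    | inr b =>
      simp only [pvEqA, pvLtA, pvGtA, pvLeA, pvGeA, pvSign]
      obtain ⟨k1, k2, k3, k4, k5, k6⟩ := key a b
      simp only [show (a == b) = (if a = b then true else false) from by by_cases h : a = b <;> simp [h],
          show (decide (a < b)) = (if a < b then true else false) from by by_cases h : a < b <;> simp [h],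
          show (decide (b < a)) = (if b < a then true else false) from by by_cases h : b < a <;> simp [h],
          show (decide (a ≤ b)) = (if a ≤ b then true else false) from by by_cases h : a ≤ b <;> simp [h],
          show (decide (b ≤ a)) = (if b ≤ a then true else false) from by by_cases h : b ≤ a <;> simp [h]]
      rw [chain_boole op _ _ _ _ _ _ _ _ k1 k2 k3 k4 k5 k6]
      split_ifs <;> rfl

-- ===== VERDICT (by name: the statement is the Claim_ definition above) =====
theorem juntaComCondicao_spec : Claim_equal_juntaComCondicao := by
  intro tabela1 tabela2 colunaComum coluna operador valor _ _
  unfold Spec_juntaComCondicao juntaComCondicao juntaComCondicao_alt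
  refine congrArg (fun x : List (PySem.Dict String String) × (Int ⊕ String) => pvTranspose x.1) ?_
  refine List.foldl_ext _ _ _ ?_
  intro acc linha1 _
  by_cases hc : (pvRow linha1).contains colunaComum
  · simp only [hc, if_true]
    rw [index_get_eq_rev_find]
    cases tabela2.reverse.find? (fun cand => (pvRow cand).getD colunaComum "" == ((pvRow linha1).getD colunaComum "")) with
    | none => rfl
    | some linha2 => exact chain_eq_sign _ _ _ _ _ _
  · simp only [Bool.not_eq_true] at hc
    simp [hc]
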